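-- pv_equiv track=rewrite | github.com/noblepayne/pinboard-poster | cleanup/collapse_ci_commits.py | partition_ci_runs
-- ===== SOURCE A (Python) =====
-- def partition_ci_runs(commits, target_author, target_message):
--     """Partition commits into runs of consecutive CI commits"""
--     if not commits:
--         return []
--
--     runs = []
--     current_run = []
--
--     for c in commits:
--         is_ci = c["author_email"] == target_author and c["message"] == target_message
--         if is_ci:
--             current_run.append(c)
--         else:
--             if current_run:
--                 runs.append(current_run)
--                 current_run = []
--
--     if current_run:
--         runs.append(current_run)
--
--     return runs
-- ===== SOURCE B (Python) =====
-- def partition_ci_runs(commits, target_author, target_message):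
--     """Partition commits into runs of consecutive CI commits"""
--     def is_ci(c):
--         return c["author_email"] == target_author and c["message"] == target_message
--
--     runs = []
--     n = len(commits)
--     i = 0
--     while i < n:
--         if is_ci(commits[i]):
--             j = i
--             while j < n and is_ci(commits[j]):
--                 j += 1
--             runs.append(commits[i:j])
--             i = j
--         else:
--             i += 1
--     return runs
-- ===== Notes on version B (the rewrite author's own statement) =====
-- stated objective: alternative
-- what changed: Replaces A's accumulator-and-flush fold (current_run grown element by element and flushed at boundaries and after the loop) by a two-pointer span scan: an outer index finds the start of a CI run, an inner index advances to its end, and the run is appended as one slice commits[i:j].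
import Mathlib
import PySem

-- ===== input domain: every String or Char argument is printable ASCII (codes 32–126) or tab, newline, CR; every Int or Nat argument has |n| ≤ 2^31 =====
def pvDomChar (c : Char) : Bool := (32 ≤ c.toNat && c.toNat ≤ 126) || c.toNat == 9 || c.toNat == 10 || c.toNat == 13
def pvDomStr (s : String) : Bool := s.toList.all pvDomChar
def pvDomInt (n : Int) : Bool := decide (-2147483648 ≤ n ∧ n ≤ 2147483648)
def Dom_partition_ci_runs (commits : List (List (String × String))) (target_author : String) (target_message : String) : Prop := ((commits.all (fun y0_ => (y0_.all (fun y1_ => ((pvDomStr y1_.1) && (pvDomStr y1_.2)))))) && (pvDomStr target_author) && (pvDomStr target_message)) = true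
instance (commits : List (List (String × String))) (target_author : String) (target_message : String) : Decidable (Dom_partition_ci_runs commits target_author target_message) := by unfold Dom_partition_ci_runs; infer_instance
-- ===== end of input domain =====

-- ===== PORT A =====
-- B changes A's accumulator-and-flush single pass into a two-pointer span scan; objective: alternative (same O(n) cost).

-- is_ci: c["author_email"] == target_author and c["message"] == target_message
-- (dict lookup = first match on the association list; on inputs admitted by Pre_ both keys that
--  Python actually reads are present, so the total Option comparison below is exact)
def pvIsCI (target_author target_message : String) (c : List (String × String)) : Bool :=
  (c.lookup "author_email" == some target_author) && (c.lookup "message" == some target_message)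

-- A's for-loop over commits with state (runs, current_run); the [] case is the after-loop flush
def pvALoop {α : Type} (key : α → Bool) (runs : List (List α)) (cur : List α) :
    List α → List (List α)
  | [] => if cur.isEmpty then runs else runs ++ [cur]
  | c :: rest =>
      if key c then pvALoop key runs (cur ++ [c]) rest
      else if cur.isEmpty then pvALoop key runs cur rest
      else pvALoop key (runs ++ [cur]) [] rest

def partition_ci_runs (commits : List (List (String × String))) (target_author : String) (target_message : String) : List (List (List (String × String))) :=
  match commits with
  | [] => []
  | _ => pvALoop (pvIsCI target_author target_message) [] [] commits

-- ===== PORT B =====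
-- inner 'while j < n and is_ci(commits[j]): j += 1' (commits[j] is in range whenever j < n = len commits)
def pvBInner (key : List (String × String) → Bool) (xs : List (List (String × String))) (n j : Nat) : Nat :=
  if h : j < n then
    if key (xs.getD j []) then pvBInner key xs n (j + 1) else j
  else j
  termination_by n - j

-- termination helper for the outer loop: the inner while never moves j backwards, and moves it
-- forward at least once when it is entered on a key-true position
theorem pvBInner_ge (key : List (String × String) → Bool) (xs : List (List (String × String))) (n j : Nat) :
    j ≤ pvBInner key xs n j := by
  fun_induction pvBInner key xs n j with
  | case1 _ _ _ ih => exact Nat.le_of_succ_le ih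
  | case2 => exact Nat.le_refl _
  | case3 => exact Nat.le_refl _

theorem pvBInner_gt (key : List (String × String) → Bool) (xs : List (List (String × String))) (n i : Nat)
    (h : i < n) (hk : key (xs.getD i []) = true) : i < pvBInner key xs n i := by
  rw [pvBInner, dif_pos h, if_pos hk]
  exact Nat.lt_of_lt_of_le (Nat.lt_succ_self i) (pvBInner_ge key xs n (i + 1))

-- outer 'while i < n' loop of B, with the run appended as one slice commits[i:j]
def pvBOuter (key : List (String × String) → Bool) (xs : List (List (String × String))) (n i : Nat)
    (runs : List (List (List (String × String)))) : List (List (List (String × String))) :=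
  if h : i < n then
    if hk : key (xs.getD i []) then
      pvBOuter key xs n (pvBInner key xs n i)
        (runs ++ [PySem.List.slice xs (some (i : Int)) (some ((pvBInner key xs n i : Nat) : Int))])
    else pvBOuter key xs n (i + 1) runs
  else runs
  termination_by n - i
  decreasing_by
  · have := pvBInner_gt key xs n i h hk; omega
  · omega

def partition_ci_runs_alt (commits : List (List (String × String))) (target_author : String) (target_message : String) : List (List (List (String × String))) :=
  pvBOuter (pvIsCI target_author target_message) commits commits.length 0 []

-- ===== PRECONDITION & SPEC =====
-- Pre_ excludes exactly the inputs on which Python A raises KeyError: a commit missing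
-- "author_email", or one whose author matches but which is missing "message" (B raises there too).
def Pre_partition_ci_runs (commits : List (List (String × String))) (target_author : String) (target_message : String) : Prop :=
  ∀ c ∈ commits, (c.lookup "author_email").isSome ∧
    (c.lookup "author_email" = some target_author → (c.lookup "message").isSome)

instance (commits : List (List (String × String))) (target_author : String) (target_message : String) : Decidable (Pre_partition_ci_runs commits target_author target_message) := by unfold Pre_partition_ci_runs; infer_instance

def pvWitness_partition_ci_runs : (List (List (String × String))) × String × String :=
  ([[("author_email", "ci@x"), ("message", "bump")], [("author_email", "dev@x"), ("message", "fix")]], "ci@x", "bump")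

def Spec_partition_ci_runs (commits : List (List (String × String))) (target_author : String) (target_message : String) (out : List (List (List (String × String)))) : Prop := out = partition_ci_runs_alt commits target_author target_message
instance (commits : List (List (String × String))) (target_author : String) (target_message : String) (out : List (List (List (String × String)))) : Decidable (Spec_partition_ci_runs commits target_author target_message out) := by unfold Spec_partition_ci_runs; infer_instance

-- ===== CLAIM (what is proved, stated in full; the proofs are below) =====
def Claim_equal_partition_ci_runs : Prop := ∀ (commits : List (List (String × String))) (target_author : String) (target_message : String), Dom_partition_ci_runs commits target_author target_message → Pre_partition_ci_runs commits target_author target_message → Spec_partition_ci_runs commits target_author target_message (partition_ci_runs commits target_author target_message)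

-- ===== LEMMAS AND PROOFS =====

-- common reference form: the list of maximal key-true runs
def runsSpec {α : Type} (key : α → Bool) : List α → List (List α)
  | [] => []
  | c :: rest =>
      if key c then (c :: rest.takeWhile key) :: runsSpec key (rest.dropWhile key)
      else runsSpec key rest
  termination_by l => l.length
  decreasing_by
  · exact Nat.lt_succ_of_le (List.length_dropWhile_le (p := key) rest)
  · exact Nat.lt_succ_self _

theorem runsSpec_cons_pos {α : Type} (key : α → Bool) (c : α) (rest : List α) (hk : key c = true) :
    runsSpec key (c :: rest) =
      ((c :: rest).takeWhile key) :: runsSpec key ((c :: rest).dropWhile key) := by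
  rw [runsSpec, if_pos hk, List.takeWhile_cons_of_pos hk, List.dropWhile_cons_of_pos hk]

-- A's loop computes runsSpec
theorem pvALoop_spec {α : Type} (key : α → Bool) (l : List α) :
    (∀ runs cur, cur.isEmpty = false →
        pvALoop key runs cur l =
          runs ++ (cur ++ l.takeWhile key) :: runsSpec key (l.dropWhile key)) ∧
    (∀ runs, pvALoop key runs [] l = runs ++ runsSpec key l) := by
  induction l with
  | nil =>
      constructor
      · intro runs cur hcur
        rw [pvALoop, hcur]
        simp [runsSpec]
      · intro runs
        rw [pvALoop]
        simp [runsSpec]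
  | cons c rest ih =>
      constructor
      · intro runs cur hcur
        by_cases hk : key c
        · rw [pvALoop, if_pos hk, ih.1 runs (cur ++ [c]) (by simp),
            List.takeWhile_cons_of_pos hk, List.dropWhile_cons_of_pos hk]
          simp
        · rw [pvALoop, if_neg hk, hcur]
          simp only [Bool.false_eq_true, if_false]
          rw [ih.2 (runs ++ [cur]),
            List.takeWhile_cons_of_neg hk, List.dropWhile_cons_of_neg hk,
            runsSpec, if_neg hk]
          simp
      · intro runs
        by_cases hk : key c
        · rw [pvALoop, if_pos hk]
          simp only [List.nil_append]
          rw [ih.1 runs [c] rfl, runsSpec_cons_pos key c rest hk,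
            List.takeWhile_cons_of_pos hk, List.dropWhile_cons_of_pos hk]
          simp
        · rw [pvALoop, if_neg hk]
          simp only [List.isEmpty_nil, if_true]
          rw [ih.2 runs, runsSpec, if_neg hk]

-- the inner while ends exactly at the end of the key-true span starting at j
theorem pvBInner_spec (key : List (String × String) → Bool) (xs : List (List (String × String))) (j : Nat) :
    pvBInner key xs xs.length j = j + ((xs.drop j).takeWhile key).length := by
  fun_induction pvBInner key xs xs.length j with
  | case1 j h hk ih =>
      have hd : xs.drop j = xs[j] :: xs.drop (j + 1) := List.drop_eq_getElem_cons h
      have hg : xs.getD j [] = xs[j] := List.getD_eq_getElem xs [] h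
      rw [ih, hd, List.takeWhile_cons_of_pos (hg ▸ hk)]
      simp; omega
  | case2 j h hk =>
      have hd : xs.drop j = xs[j] :: xs.drop (j + 1) := List.drop_eq_getElem_cons h
      have hg : xs.getD j [] = xs[j] := List.getD_eq_getElem xs [] h
      rw [hd, List.takeWhile_cons_of_neg (hg ▸ hk)]
      simp
  | case3 j h =>
      rw [List.drop_eq_nil_of_le (by omega)]
      simp

-- B's outer loop computes runsSpec of the remaining suffix
theorem pvBOuter_spec (key : List (String × String) → Bool) (xs : List (List (String × String)))
    (i : Nat) (runs : List (List (List (String × String)))) :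
    pvBOuter key xs xs.length i runs = runs ++ runsSpec key (xs.drop i) := by
  fun_induction pvBOuter key xs xs.length i runs with
  | case1 i runs h hk ih =>
      have hd : xs.drop i = xs[i] :: xs.drop (i + 1) := List.drop_eq_getElem_cons h
      have hg : xs.getD i [] = xs[i] := List.getD_eq_getElem xs [] h
      have hjs : pvBInner key xs xs.length i = i + ((xs.drop i).takeWhile key).length :=
        pvBInner_spec key xs i
      have hslice : PySem.List.slice xs (some (i : Int)) (some ((pvBInner key xs xs.length i : Nat) : Int)) =
          (xs.drop i).takeWhile key := by
        rw [PySem.List.slice_natCast]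
        have harith : pvBInner key xs xs.length i - i = ((xs.drop i).takeWhile key).length := by omega
        rw [harith]
        obtain ⟨t, ht⟩ := List.takeWhile_prefix (l := xs.drop i) (p := key)
        generalize hgen : (xs.drop i).takeWhile key = tw at ht ⊢
        rw [← ht, List.take_left]
      have hdropj : xs.drop (pvBInner key xs xs.length i) = (xs.drop i).dropWhile key := by
        have hdw := List.takeWhile_append_dropWhile (p := key) (l := xs.drop i)
        generalize hg1 : (xs.drop i).takeWhile key = tw at hdw hjs
        generalize hg2 : (xs.drop i).dropWhile key = dw at hdw ⊢
        rw [hjs, ← List.drop_drop, ← hdw, List.drop_left]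
      rw [ih, hslice, hdropj, hd, runsSpec_cons_pos key _ _ (hg ▸ hk), ← hd]
      simp
  | case2 i runs h hk ih =>
      have hd : xs.drop i = xs[i] :: xs.drop (i + 1) := List.drop_eq_getElem_cons h
      have hg : xs.getD i [] = xs[i] := List.getD_eq_getElem xs [] h
      rw [ih, hd, runsSpec, if_neg (hg ▸ hk)]
  | case3 i runs h =>
      rw [List.drop_eq_nil_of_le (by omega)]
      simp [runsSpec]

-- ===== VERDICT (by name: the statement is the Claim_ definition above) =====
theorem partition_ci_runs_spec : Claim_equal_partition_ci_runs := by
  intro commits ta tm _ _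
  unfold Spec_partition_ci_runs partition_ci_runs partition_ci_runs_alt
  rw [pvBOuter_spec (pvIsCI ta tm) commits 0 []]
  cases commits with
  | nil => simp [runsSpec]
  | cons c cs =>
      simp only [List.drop_zero, List.nil_append]
      exact (pvALoop_spec (pvIsCI ta tm) (c :: cs)).2 []
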